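-- pv_equiv track=rewrite | github.com/ALKME61/1semestre | pz-13/pz-13_2.py | sum_and_product_of_column
-- ===== SOURCE A (Python) =====
-- def sum_and_product_of_column(matrix, colIndex):
--
--   colSum = 0
--   colProduct = 14
--
--   for row in matrix:
--     if colIndex < len(row):
--       colSum += row[colIndex]
--       colProduct *= row[colIndex]
--
--   return colSum, colProduct
-- ===== SOURCE B (Python) =====
-- def sum_and_product_of_column(matrix, colIndex):
--     def rec(lo, hi):
--         # (sum, product) of the in-range column entries among rows lo..hi-1
--         if hi <= lo:
--             return 0, 1
--         if hi - lo == 1: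
--             row = matrix[lo]
--             if colIndex < len(row):
--                 v = row[colIndex]
--                 return v, v
--             return 0, 1
--         mid = (lo + hi) // 2
--         s1, p1 = rec(lo, mid)
--         s2, p2 = rec(mid, hi)
--         return s1 + s2, p1 * p2
--     s, p = rec(0, len(matrix))
--     return s, 14 * p
-- ===== Notes on version B (the rewrite author's own statement) =====
-- stated objective: alternative
-- what changed: B replaces A's single fused left-to-right accumulator loop with a divide-and-conquer recursion over index ranges that combines (sum, product) pairs of the two halves with the monoid operation (+, *), applying the 14 seed once at the top; correct because both sum and product are associative. Pre_ excludes only inputs where row[colIndex] raises IndexError (a row passing the guard but with colIndex < -len(row)).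
import Mathlib
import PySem

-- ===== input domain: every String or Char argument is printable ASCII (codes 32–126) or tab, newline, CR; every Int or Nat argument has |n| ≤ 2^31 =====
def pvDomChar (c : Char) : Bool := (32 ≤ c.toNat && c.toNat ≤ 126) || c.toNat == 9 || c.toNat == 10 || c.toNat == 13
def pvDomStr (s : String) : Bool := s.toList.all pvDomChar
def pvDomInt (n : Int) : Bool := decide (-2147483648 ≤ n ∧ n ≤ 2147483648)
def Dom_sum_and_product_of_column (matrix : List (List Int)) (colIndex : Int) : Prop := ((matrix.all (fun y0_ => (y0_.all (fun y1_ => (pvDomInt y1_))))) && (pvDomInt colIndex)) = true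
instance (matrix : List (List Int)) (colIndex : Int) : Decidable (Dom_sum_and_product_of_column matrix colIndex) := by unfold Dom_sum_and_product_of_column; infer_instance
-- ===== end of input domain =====

-- B computes the column's (sum, product) by divide-and-conquer over index ranges, combining halves with (+, *) and applying the 14 seed once at the top, instead of A's fused accumulator loop.


-- ===== PORT A =====
-- fused loop: one pass, accumulating (sum, product) seeded (0, 14); row[colIndex]
-- ported with pyGetD 0 — under Pre_ the guarded access is always in range.
def sum_and_product_of_column (matrix : List (List Int)) (colIndex : Int) : Int × Int :=
  matrix.foldl
    (fun st row =>
      if colIndex < (row.length : Int) then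
        (st.1 + PySem.List.pyGetD row colIndex 0, st.2 * PySem.List.pyGetD row colIndex 0)
      else st)
    (0, 14)

-- ===== PORT B =====
-- divide-and-conquer recursion of Source B; matrix[lo] is ported with getD (lo is a
-- natural index with lo < matrix.length whenever this branch is reached), and
-- row[colIndex] with pyGetD 0 — in range under Pre_, exactly as in A's port.
def spocRec (matrix : List (List Int)) (colIndex : Int) (lo hi : Nat) : Int × Int :=
  if hi ≤ lo then (0, 1)
  else if hi - lo = 1 then
    let row := matrix.getD lo []
    if colIndex < (row.length : Int) then
      let v := PySem.List.pyGetD row colIndex 0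
      (v, v)
    else (0, 1)
  else
    let mid := (lo + hi) / 2
    let a := spocRec matrix colIndex lo mid
    let b := spocRec matrix colIndex mid hi
    (a.1 + b.1, a.2 * b.2)
termination_by hi - lo
decreasing_by all_goals omega

def sum_and_product_of_column_alt (matrix : List (List Int)) (colIndex : Int) : Int × Int :=
  let sp := spocRec matrix colIndex 0 matrix.length
  (sp.1, 14 * sp.2)

-- ===== PRECONDITION & SPEC =====
-- Pre_ excludes exactly the inputs where Python A raises IndexError: a row passing the
-- guard colIndex < len(row) but with colIndex < -len(row) (negative index out of range).
def Pre_sum_and_product_of_column (matrix : List (List Int)) (colIndex : Int) : Prop :=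
  ∀ row ∈ matrix, colIndex < (row.length : Int) → -(row.length : Int) ≤ colIndex
instance (matrix : List (List Int)) (colIndex : Int) : Decidable (Pre_sum_and_product_of_column matrix colIndex) := by unfold Pre_sum_and_product_of_column; infer_instance
def pvWitness_sum_and_product_of_column : List (List Int) × Int := ([[1, 2], [3, 4], [5]], 1)

def Spec_sum_and_product_of_column (matrix : List (List Int)) (colIndex : Int) (out : Int × Int) : Prop := out = sum_and_product_of_column_alt matrix colIndex
instance (matrix : List (List Int)) (colIndex : Int) (out : Int × Int) : Decidable (Spec_sum_and_product_of_column matrix colIndex out) := by unfold Spec_sum_and_product_of_column; infer_instance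

-- ===== CLAIM (what is proved, stated in full; the proofs are below) =====
def Claim_equal_sum_and_product_of_column : Prop := ∀ (matrix : List (List Int)) (colIndex : Int), Dom_sum_and_product_of_column matrix colIndex → Pre_sum_and_product_of_column matrix colIndex → Spec_sum_and_product_of_column matrix colIndex (sum_and_product_of_column matrix colIndex)

-- ===== LEMMAS AND PROOFS =====

-- proof-only structural recursion: (sum, product) of the column entries of a row list
def colAgg (colIndex : Int) : List (List Int) → Int × Int
  | [] => (0, 1)
  | r :: rs =>
    let t := colAgg colIndex rs
    if colIndex < (r.length : Int) then
      (PySem.List.pyGetD r colIndex 0 + t.1, PySem.List.pyGetD r colIndex 0 * t.2)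
    else t

theorem colAgg_append (colIndex : Int) (l1 l2 : List (List Int)) :
    colAgg colIndex (l1 ++ l2)
      = ((colAgg colIndex l1).1 + (colAgg colIndex l2).1,
         (colAgg colIndex l1).2 * (colAgg colIndex l2).2) := by
  induction l1 with
  | nil => simp [colAgg]
  | cons r rs ih =>
    by_cases h : colIndex < (r.length : Int) <;>
      simp [colAgg, h, ih, add_assoc, mul_assoc]

theorem spocRec_eq_colAgg (matrix : List (List Int)) (colIndex : Int) :
    ∀ k lo hi, hi - lo ≤ k → hi ≤ matrix.length →
      spocRec matrix colIndex lo hi = colAgg colIndex ((matrix.drop lo).take (hi - lo)) := by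
  intro k
  induction k with
  | zero =>
    intro lo hi hk _
    have h0 : hi ≤ lo := by omega
    rw [spocRec]
    simp [h0, Nat.sub_eq_zero_of_le h0, colAgg]
  | succ n ih =>
    intro lo hi hk hlen
    rw [spocRec]
    by_cases h0 : hi ≤ lo
    · simp [h0, Nat.sub_eq_zero_of_le h0, colAgg]
    · simp only [h0, if_false]
      by_cases h1 : hi - lo = 1
      · have hlt : lo < matrix.length := by omega
        have : (matrix.drop lo).take (hi - lo) = [matrix.getD lo []] := by
          rw [h1]
          rw [List.getD_eq_getElem _ _ hlt]
          rw [List.take_one, List.head?_drop]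
          simp [List.getElem?_eq_getElem hlt]
        rw [this]
        by_cases h : colIndex < ((matrix.getD lo []).length : Int) <;>
          simp [h1, colAgg]
      · simp only [h1, if_false]
        have hmid1 : (lo + hi) / 2 - lo ≤ n := by omega
        have hmid2 : hi - (lo + hi) / 2 ≤ n := by omega
        rw [ih lo ((lo + hi) / 2) hmid1 (by omega), ih ((lo + hi) / 2) hi hmid2 hlen]
        have hsplit : (matrix.drop lo).take (hi - lo)
            = (matrix.drop lo).take ((lo + hi) / 2 - lo)
              ++ (matrix.drop ((lo + hi) / 2)).take (hi - (lo + hi) / 2) := by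
          have : hi - lo = ((lo + hi) / 2 - lo) + (hi - (lo + hi) / 2) := by omega
          rw [this, List.take_add, List.drop_drop]
          have h2 : lo + ((lo + hi) / 2 - lo) = (lo + hi) / 2 := by omega
          rw [h2]
        rw [hsplit, colAgg_append]

-- A's fused fold from seeds (s, p) equals seeds combined with colAgg of the rest
theorem fold_eq_colAgg (colIndex : Int) (matrix : List (List Int)) (s p : Int) :
    matrix.foldl
      (fun st row =>
        if colIndex < (row.length : Int) then
          (st.1 + PySem.List.pyGetD row colIndex 0, st.2 * PySem.List.pyGetD row colIndex 0)
        else st)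
      (s, p)
    = (s + (colAgg colIndex matrix).1, p * (colAgg colIndex matrix).2) := by
  induction matrix generalizing s p with
  | nil => simp [colAgg]
  | cons r rs ih =>
    by_cases h : colIndex < (r.length : Int) <;>
      simp [List.foldl, colAgg, h, ih, add_assoc, mul_assoc]

-- ===== VERDICT (by name: the statement is the Claim_ definition above) =====
theorem sum_and_product_of_column_spec : Claim_equal_sum_and_product_of_column := by
  intro matrix colIndex _ _
  unfold Spec_sum_and_product_of_column sum_and_product_of_column sum_and_product_of_column_alt
  rw [fold_eq_colAgg,
    spocRec_eq_colAgg matrix colIndex matrix.length 0 matrix.length (by omega) (by omega)]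
  simp [mul_comm]
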